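-- pv_equiv track=rewrite | github.com/Abraar-x13/RandomHelps | Assignments Done/BracU CSE220 Lab/Lab 6 Searching and Sorting/old/Lab06_p-1.py | minLocation
-- ===== SOURCE A (Python) =====
-- def minLocation(array, count, count2):
--     if count == count2:
--         return count
--
--     minimum = minLocation(array, count + 1, count2)
--
--     if (array[count] < array[minimum]):
--         return count
--     else:
--         return minimum
-- ===== SOURCE B (Python) =====
-- def minLocation(array, count, count2):
--     minimum = count
--     for i in range(count + 1, count2 + 1):
--         if array[i] <= array[minimum]:
--             minimum = i
--     return minimum
-- ===== Notes on version B (the rewrite author's own statement) =====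
-- stated objective: idiomatic
-- what changed: Replaces the right-to-left recursion with a plain left-to-right iterative scan keeping the current argmin index, using <= so ties resolve to the last occurrence exactly as A does.
import Mathlib
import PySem

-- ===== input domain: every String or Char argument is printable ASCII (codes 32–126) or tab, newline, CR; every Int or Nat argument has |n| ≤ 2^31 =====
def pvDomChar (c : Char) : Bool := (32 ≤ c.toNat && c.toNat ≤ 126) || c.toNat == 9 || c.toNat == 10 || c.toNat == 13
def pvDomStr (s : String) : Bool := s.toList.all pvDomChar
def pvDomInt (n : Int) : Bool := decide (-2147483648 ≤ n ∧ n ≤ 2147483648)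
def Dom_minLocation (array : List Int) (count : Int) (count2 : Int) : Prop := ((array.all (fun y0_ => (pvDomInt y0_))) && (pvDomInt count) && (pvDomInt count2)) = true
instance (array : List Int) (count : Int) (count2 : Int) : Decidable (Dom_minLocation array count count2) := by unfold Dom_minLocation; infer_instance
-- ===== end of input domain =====

-- B replaces A's right-to-left recursion with an iterative left-to-right argmin scan (same O(n) work, no recursion stack).


-- ===== PORT A =====
-- literal port of A's recursion; the '=> 0' arms are IndexError / the count > count2
-- RecursionError, both excluded by Pre_minLocation
def minLocation (array : List Int) (count : Int) (count2 : Int) : Int :=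
  if count = count2 then count
  else if _h : count < count2 then
    let minimum := minLocation array (count + 1) count2
    match PySem.List.pyGet? array count, PySem.List.pyGet? array minimum with
    | some a, some b => if a < b then count else minimum
    | _, _ => 0
  else 0
termination_by (count2 - count).toNat
decreasing_by omega

-- ===== PORT B =====
-- loop body of Source B: if array[i] <= array[minimum] then minimum = i
-- (the fall-through arm is IndexError, excluded by Pre_minLocation)
def bStep (array : List Int) (m : Int) (i : Int) : Int :=
  match PySem.List.pyGet? array i with
  | some a =>
    match PySem.List.pyGet? array m with
    | some b => if a ≤ b then i else m
    | none => m
  | none => m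

def minLocation_alt (array : List Int) (count : Int) (count2 : Int) : Int :=
  (PySem.List.pyRange (count + 1) (count2 + 1) 1).foldl (bStep array) count

-- ===== PRECONDITION & SPEC =====
-- Pre_ excludes count > count2 (A raises RecursionError) and, for count < count2,
-- indices outside [-len, len) (A raises IndexError); when count = count2 A returns
-- count without indexing, so no bound is required there.
def Pre_minLocation (array : List Int) (count : Int) (count2 : Int) : Prop :=
  count = count2 ∨ (count < count2 ∧ -(array.length : Int) ≤ count ∧ count2 < (array.length : Int))
instance (array : List Int) (count : Int) (count2 : Int) : Decidable (Pre_minLocation array count count2) := by unfold Pre_minLocation; infer_instance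

def pvWitness_minLocation : List Int × Int × Int := ([3, 1, 2, 1, 5], 0, 4)

def Spec_minLocation (array : List Int) (count : Int) (count2 : Int) (out : Int) : Prop := out = minLocation_alt array count count2
instance (array : List Int) (count : Int) (count2 : Int) (out : Int) : Decidable (Spec_minLocation array count count2 out) := by unfold Spec_minLocation; infer_instance

-- ===== CLAIM (what is proved, stated in full; the proofs are below) =====
def Claim_equal_minLocation : Prop := ∀ (array : List Int) (count : Int) (count2 : Int), Dom_minLocation array count count2 → Pre_minLocation array count count2 → Spec_minLocation array count count2 (minLocation array count count2)
-- ===== LEMMAS AND PROOFS =====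

-- bStep on valid indices is the <=-comparison
theorem bStep_eq (array : List Int) (m i vm vi : Int)
    (hm : PySem.List.pyGet? array m = some vm) (hi : PySem.List.pyGet? array i = some vi) :
    bStep array m i = if vi ≤ vm then i else m := by
  unfold bStep; rw [hi, hm]

-- bStep keeps the accumulator or takes the new index
theorem bStep_cases (array : List Int) (m c : Int) :
    bStep array m c = m ∨ bStep array m c = c := by
  unfold bStep
  rcases h1 : PySem.List.pyGet? array c with _ | a
  · exact Or.inl rfl
  rcases h2 : PySem.List.pyGet? array m with _ | b
  · exact Or.inl rfl
  dsimp only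
  split
  · exact Or.inr rfl
  · exact Or.inl rfl

-- the scan's accumulator is either the start index or one of the scanned indices
theorem foldl_bStep_mem (array : List Int) (l : List Int) (m : Int) :
    l.foldl (bStep array) m = m ∨ l.foldl (bStep array) m ∈ l := by
  induction l generalizing m with
  | nil => exact Or.inl rfl
  | cons c l ih =>
    simp only [List.foldl_cons]
    rcases ih (bStep array m c) with h | h
    · rcases bStep_cases array m c with hb | hb
      · rw [h, hb]; exact Or.inl rfl
      · rw [h, hb]; exact Or.inr List.mem_cons_self
    · exact Or.inr (List.mem_cons_of_mem _ h)

-- on valid indices, one more comparison commutes past the whole scan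
theorem foldl_bStep_step (array : List Int) (l : List Int) (m c : Int)
    (hm : (PySem.List.pyGet? array m).isSome)
    (hc : (PySem.List.pyGet? array c).isSome)
    (hl : ∀ x ∈ l, (PySem.List.pyGet? array x).isSome) :
    l.foldl (bStep array) (bStep array m c) = bStep array m (l.foldl (bStep array) c) := by
  induction l generalizing m c with
  | nil => rfl
  | cons d l ih =>
    have hd : (PySem.List.pyGet? array d).isSome := hl d (List.mem_cons_self)
    have hl' : ∀ x ∈ l, (PySem.List.pyGet? array x).isSome :=
      fun x hx => hl x (List.mem_cons_of_mem _ hx)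
    have hmc : (PySem.List.pyGet? array (bStep array m c)).isSome := by
      rcases bStep_cases array m c with hb | hb <;> rw [hb]
      · exact hm
      · exact hc
    simp only [List.foldl_cons]
    rw [ih _ _ hmc hd hl', ih _ _ hc hd hl']
    have hrS : (PySem.List.pyGet? array (l.foldl (bStep array) d)).isSome := by
      rcases foldl_bStep_mem array l d with h | h
      · rw [h]; exact hd
      · exact hl' _ h
    obtain ⟨vm, hvm⟩ := Option.isSome_iff_exists.mp hm
    obtain ⟨vc, hvc⟩ := Option.isSome_iff_exists.mp hc
    obtain ⟨vr, hvr⟩ := Option.isSome_iff_exists.mp hrS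
    by_cases h2 : vr ≤ vc
    · rw [bStep_eq array c _ vc vr hvc hvr, if_pos h2]
      by_cases h1 : vc ≤ vm
      · rw [bStep_eq array m c vm vc hvm hvc, if_pos h1,
          bStep_eq array c _ vc vr hvc hvr, if_pos h2,
          bStep_eq array m _ vm vr hvm hvr, if_pos (le_trans h2 h1)]
      · rw [bStep_eq array m c vm vc hvm hvc, if_neg h1]
    · rw [bStep_eq array c _ vc vr hvc hvr, if_neg h2]
      by_cases h1 : vc ≤ vm
      · rw [bStep_eq array m c vm vc hvm hvc, if_pos h1,
          bStep_eq array c _ vc vr hvc hvr, if_neg h2]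
      · rw [bStep_eq array m c vm vc hvm hvc, if_neg h1,
          bStep_eq array m _ vm vr hvm hvr, if_neg (by omega : ¬ vr ≤ vm)]

theorem minLocation_eq_alt (array : List Int) :
    ∀ (n : Nat) (count count2 : Int), (count2 - count).toNat = n →
      Pre_minLocation array count count2 →
      minLocation array count count2 = minLocation_alt array count count2 := by
  intro n
  induction n with
  | zero =>
    intro count count2 hn hpre
    have hcc : count = count2 := by
      rcases hpre with h | ⟨h, _⟩
      · exact h
      · omega
    subst hcc
    rw [minLocation, if_pos rfl]
    unfold minLocation_alt
    rw [PySem.List.pyRange_one_eq_nil (by omega)]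
    rfl
  | succ n ih =>
    intro count count2 hn hpre
    have hlt : count < count2 := by
      rcases hpre with h | ⟨h, _⟩
      · omega
      · exact h
    rcases hpre with h | ⟨_, hlo, hhi⟩
    · omega
    rw [minLocation]
    simp only [if_neg (by omega : ¬ count = count2), dif_pos hlt]
    have hpre' : Pre_minLocation array (count + 1) count2 := by
      unfold Pre_minLocation; omega
    have hIH := ih (count + 1) count2 (by omega) hpre'
    unfold minLocation_alt at hIH ⊢
    rw [PySem.List.pyRange_one_cons (by omega : count + 1 < count2 + 1)]
    simp only [List.foldl_cons]
    have hvalid : ∀ x : Int, -(array.length : Int) ≤ x → x < (array.length : Int) →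
        (PySem.List.pyGet? array x).isSome := by
      intro x h1 h2
      rw [Option.isSome_iff_ne_none]
      intro hnone
      rw [PySem.List.pyGet?_eq_none_iff] at hnone
      exact hnone ⟨h1, h2⟩
    have hm : (PySem.List.pyGet? array count).isSome := hvalid _ hlo (by omega)
    have hc : (PySem.List.pyGet? array (count + 1)).isSome := hvalid _ (by omega) (by omega)
    have hl : ∀ x ∈ PySem.List.pyRange (count + 1 + 1) (count2 + 1) 1,
        (PySem.List.pyGet? array x).isSome := by
      intro x hx
      rw [PySem.List.mem_pyRange_one] at hx
      exact hvalid x (by omega) (by omega)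
    rw [foldl_bStep_step array _ count (count + 1) hm hc hl]
    have hrS : (PySem.List.pyGet? array
        ((PySem.List.pyRange (count + 1 + 1) (count2 + 1) 1).foldl (bStep array) (count + 1))).isSome := by
      rcases foldl_bStep_mem array (PySem.List.pyRange (count + 1 + 1) (count2 + 1) 1) (count + 1) with h | h
      · rw [h]; exact hc
      · exact hl _ h
    obtain ⟨vm, hvm⟩ := Option.isSome_iff_exists.mp hm
    obtain ⟨vr, hvr⟩ := Option.isSome_iff_exists.mp hrS
    rw [bStep_eq array count _ vm vr hvm hvr]
    rw [hIH, hvm, hvr]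
    dsimp only
    split_ifs <;> omega

-- ===== VERDICT (by name: the statement is the Claim_ definition above) =====
theorem minLocation_spec : Claim_equal_minLocation := by
  intro array count count2 _ hpre
  exact minLocation_eq_alt array (count2 - count).toNat count count2 rfl hpre
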